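-- pv_equiv track=rewrite | github.com/hwany8677/BOJ | 30618_unsolved.py | consec_sigma
-- ===== SOURCE A (Python) =====
-- def consec_sigma(n):
--     mx,mx_buf=0,[]
--     for i in range(1,n+1):
--         sigma=0
--         buf=[j for j in range(i,n+1)]
--         for j in range(1,i): buf.append(j)
--         for start in range(n):
--             for end in range(start,n):
--                 sigma+=sum(buf[start:end])
--         if sigma>mx:
--             mx=sigma
--             mx_buf=buf
--     return mx_buf,f"{n}: {mx_buf} {mx}"
-- ===== SOURCE B (Python) =====
-- def consec_sigma(n):
--     # Weight of position k in the triple slice-sum: (k+1) choices of start,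
--     # (n-1-k) choices of end, so sigma = sum(buf[k]*(k+1)*(n-1-k)).
--     w = [(k + 1) * (n - 1 - k) for k in range(n)]
--     # Rotation starting at i = r+1 has buf[k] = (r+k) % n + 1; score it in O(n)
--     # without materialising the rotation, tracking only the best start index.
--     best, best_r = 0, None
--     for r in range(n):
--         sigma = 0
--         for k, wk in enumerate(w):
--             sigma += ((r + k) % n + 1) * wk
--         if sigma > best:
--             best, best_r = sigma, r
--     buf = [] if best_r is None else [(best_r + k) % n + 1 for k in range(n)]
--     return buf, f"{n}: {buf} {best}"
-- ===== Notes on version B (the rewrite author's own statement) =====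
-- stated objective: faster
-- what changed: B replaces A's per-rotation triple loop of slice sums with the closed-form weight sum sigma = sum((r+k)%n+1)*(k+1)*(n-1-k) over a weight table computed once, tracks only the best rotation index, and materialises the winning rotation list once at the end instead of building every rotation.
import Mathlib
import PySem

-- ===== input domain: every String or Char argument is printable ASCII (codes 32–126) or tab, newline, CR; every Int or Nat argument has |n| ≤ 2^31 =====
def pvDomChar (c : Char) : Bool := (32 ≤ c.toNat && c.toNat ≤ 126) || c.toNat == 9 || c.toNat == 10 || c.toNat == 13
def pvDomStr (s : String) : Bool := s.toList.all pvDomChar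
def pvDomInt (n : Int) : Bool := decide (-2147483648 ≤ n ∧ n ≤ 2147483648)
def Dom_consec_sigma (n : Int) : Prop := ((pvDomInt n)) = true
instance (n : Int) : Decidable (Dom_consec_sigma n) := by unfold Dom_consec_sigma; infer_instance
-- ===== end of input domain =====

-- B scores each rotation r by the closed-form weight sum Σ ((r+k) % n + 1)*w[k]
-- (w[k] = (k+1)*(n-1-k) precomputed once), tracks only the best start index, and
-- materialises the winning rotation once at the end — asymptotically faster than
-- A's per-rotation triple loop of slice sums.


-- ===== PORT A =====
-- shared formatting helper for the f-string "{n}: {buf} {mx}" (Python list repr)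
def pvFmt (n : Int) (buf : List Int) (mx : Int) : String :=
  PySem.Int.toStr n ++ ": [" ++ String.intercalate ", " (buf.map PySem.Int.toStr) ++ "] "
    ++ PySem.Int.toStr mx

def consec_sigma (n : Int) : List Int × String :=
  let st := (PySem.List.pyRange 1 (n+1) 1).foldl (fun (acc : Int × List Int) i =>
    let buf := PySem.List.pyRange i (n+1) 1
    let buf := (PySem.List.pyRange 1 i 1).foldl (fun b j => b ++ [j]) buf
    let sigma := (PySem.List.pyRange 0 n 1).foldl (fun s start =>
        (PySem.List.pyRange start n 1).foldl (fun s e =>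
          s + (PySem.List.slice buf (some start) (some e)).sum) s) 0
    if sigma > acc.1 then (sigma, buf) else acc) ((0 : Int), ([] : List Int))
  (st.2, pvFmt n st.2 st.1)

-- ===== PORT B =====
def consec_sigma_alt (n : Int) : List Int × String :=
  let w := (PySem.List.pyRange 0 n 1).map (fun k => (k + 1) * (n - 1 - k))
  let st := (PySem.List.pyRange 0 n 1).foldl (fun (acc : Int × Option Int) r =>
    let sigma := (PySem.List.enumerate w).foldl
        (fun s kw => s + (PySem.Int.mod (r + kw.1) n + 1) * kw.2) 0
    if sigma > acc.1 then (sigma, some r) else acc) ((0 : Int), (none : Option Int))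
  let buf := match st.2 with
    | none => ([] : List Int)
    | some r => (PySem.List.pyRange 0 n 1).map (fun k => PySem.Int.mod (r + k) n + 1)
  (buf, pvFmt n buf st.1)

-- ===== PRECONDITION & SPEC =====
def Spec_consec_sigma (n : Int) (out : List Int × String) : Prop := out = consec_sigma_alt n
instance (n : Int) (out : List Int × String) : Decidable (Spec_consec_sigma n out) := by unfold Spec_consec_sigma; infer_instance

-- ===== CLAIM (what is proved, stated in full; the proofs are below) =====
def Claim_equal_consec_sigma : Prop := ∀ (n : Int), Dom_consec_sigma n → Spec_consec_sigma n (consec_sigma n)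

-- ===== LEMMAS AND PROOFS =====

-- the rotation list B builds for start index r
def pvRot (n r : Int) : List Int :=
  (PySem.List.pyRange 0 n 1).map (fun k => PySem.Int.mod (r + k) n + 1)

-- the value A's accumulator holds when B's accumulator holds o
def pvBufOf (n : Int) (o : Option Int) : List Int :=
  match o with
  | none => []
  | some r => pvRot n r

theorem pvSumMapRange (n : ℕ) (f : ℕ → Int) :
    ((List.range n).map f).sum = ∑ i ∈ Finset.range n, f i := by
  induction n with
  | zero => simp
  | succ m ih => rw [List.range_succ, Finset.sum_range_succ, List.map_append]; simp [ih]

theorem pvSumGetD (l : List Int) : l.sum = ∑ a ∈ Finset.range l.length, l.getD a 0 := by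
  induction l with
  | nil => simp
  | cons x t ih =>
      rw [List.sum_cons, List.length_cons, Finset.sum_range_succ' (fun a => (x :: t).getD a 0)]
      simp [ih]
      ring

theorem pvSliceSum (buf : List Int) (s j : ℕ) (h : s + j ≤ buf.length) :
    ((buf.drop s).take j).sum = ∑ a ∈ Finset.range j, buf.getD (s + a) 0 := by
  have hlen : ((buf.drop s).take j).length = j := by
    simp [List.length_take, List.length_drop]; omega
  rw [pvSumGetD, hlen]
  refine Finset.sum_congr rfl (fun a ha => ?_)
  have haj : a < j := Finset.mem_range.mp ha
  rw [List.getD_eq_getElem?_getD, List.getD_eq_getElem?_getD]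
  rw [List.getElem?_take_of_lt haj, List.getElem?_drop]

theorem pvTri (m : ℕ) (c : ℕ → Int) :
    ∑ j ∈ Finset.range m, ∑ a ∈ Finset.range j, c a
      = ∑ a ∈ Finset.range m, c a * ((m : Int) - 1 - (a : Int)) := by
  induction m with
  | zero => simp
  | succ p ih =>
      rw [Finset.sum_range_succ, ih, Finset.sum_range_succ]
      push_cast
      have : ∑ a ∈ Finset.range p, c a * ((p : Int) + 1 - 1 - (a : Int))
          = ∑ a ∈ Finset.range p, (c a * ((p : Int) - 1 - (a : Int)) + c a) := by
        refine Finset.sum_congr rfl (fun a _ => ?_); ring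
      rw [this, Finset.sum_add_distrib]
      ring

theorem pvSwap (N : ℕ) (g : ℕ → Int) :
    ∑ s ∈ Finset.range N, ∑ k ∈ Finset.Ico s N, g k
      = ∑ k ∈ Finset.range N, ((k : Int) + 1) * g k := by
  induction N with
  | zero => simp
  | succ p ih =>
      have step : ∀ s ∈ Finset.range (p + 1),
          ∑ k ∈ Finset.Ico s (p + 1), g k = ∑ k ∈ Finset.Ico s p, g k + g p := by
        intro s hs
        exact Finset.sum_Ico_succ_top (Nat.lt_succ_iff.mp (Finset.mem_range.mp hs)) g
      rw [Finset.sum_congr rfl step, Finset.sum_add_distrib, Finset.sum_const, Finset.card_range]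
      rw [Finset.sum_range_succ (fun s => ∑ k ∈ Finset.Ico s p, g k)]
      simp only [Finset.Ico_self, Finset.sum_empty, add_zero, ih]
      rw [Finset.sum_range_succ]
      push_cast [nsmul_eq_mul]
      ring

-- A's inner triple loop over one rotation, as a closed-form weighted sum
theorem pvSigmaA (buf : List Int) (N : ℕ) (hN : buf.length = N) :
    (PySem.List.pyRange 0 (N : Int) 1).foldl (fun s start =>
        (PySem.List.pyRange start (N : Int) 1).foldl (fun s e =>
          s + (PySem.List.slice buf (some start) (some e)).sum) s) 0
  = ∑ k ∈ Finset.range N, buf.getD k 0 * ((k : Int) + 1) * ((N : Int) - 1 - (k : Int)) := by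
  subst hN
  have inner : (fun (s : Int) (start : Int) =>
      (PySem.List.pyRange start (buf.length : Int) 1).foldl (fun s e =>
        s + (PySem.List.slice buf (some start) (some e)).sum) s)
    = fun s start => s + ((PySem.List.pyRange start (buf.length : Int) 1).map
        (fun e => (PySem.List.slice buf (some start) (some e)).sum)).sum := by
    funext s start
    exact PySem.List.foldl_add _ _ s
  rw [inner, PySem.List.foldl_add, zero_add, PySem.List.pyRange_zero_natCast,
      List.map_map, pvSumMapRange]
  have hterm : ∀ s ∈ Finset.range buf.length,
      (Function.comp (fun start => ((PySem.List.pyRange start (buf.length : Int) 1).map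
          (fun e => (PySem.List.slice buf (some start) (some e)).sum)).sum)
        (fun k : ℕ => (k : Int))) s
      = ∑ k ∈ Finset.Ico s buf.length, buf.getD k 0 * ((buf.length : Int) - 1 - (k : Int)) := by
    intro s hs
    have hsN : s < buf.length := Finset.mem_range.mp hs
    simp only [Function.comp]
    rw [PySem.List.pyRange_one]
    have h1 : ((buf.length : Int) - (s : Int)).toNat = buf.length - s := by omega
    rw [h1, List.map_map, pvSumMapRange]
    have h2 : ∀ j ∈ Finset.range (buf.length - s),
        (Function.comp (fun e => (PySem.List.slice buf (some (s : Int)) (some e)).sum)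
          (fun k : ℕ => (s : Int) + (k : Int))) j
        = ∑ a ∈ Finset.range j, buf.getD (s + a) 0 := by
      intro j hj
      have hj' : j < buf.length - s := Finset.mem_range.mp hj
      simp only [Function.comp]
      rw [PySem.List.slice_natCast_add, pvSliceSum buf s j (by omega)]
    rw [Finset.sum_congr rfl h2, pvTri]
    rw [Finset.sum_Ico_eq_sum_range]
    refine Finset.sum_congr rfl (fun a ha => ?_)
    have ha' : a < buf.length - s := Finset.mem_range.mp ha
    have : ((buf.length - s : ℕ) : Int) = (buf.length : Int) - (s : Int) := by omega
    rw [this]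
    push_cast
    ring
  rw [Finset.sum_congr rfl hterm, pvSwap]
  refine Finset.sum_congr rfl (fun k hk => ?_)
  ring

-- B's weighted pass over enumerate(w), as the same kind of sum
theorem pvSigmaB (n r : Int) (N : ℕ) (hn : n = (N : Int)) :
    (PySem.List.enumerate ((PySem.List.pyRange 0 n 1).map (fun k => (k + 1) * (n - 1 - k)))).foldl
        (fun s kw => s + (PySem.Int.mod (r + kw.1) n + 1) * kw.2) 0
  = ∑ k ∈ Finset.range N, (PySem.Int.mod (r + (k : Int)) n + 1) * (((k : Int) + 1) * (n - 1 - (k : Int))) := by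
  subst hn
  rw [PySem.List.foldl_add, zero_add,
      PySem.List.enumerate_eq_map_pyRange _ (0 : Int)]
  have hlen : PySem.List.len ((PySem.List.pyRange 0 (N : Int) 1).map (fun k => (k + 1) * ((N : Int) - 1 - k)))
      = (N : Int) := by
    simp [PySem.List.len, PySem.List.pyRange_one]
  rw [hlen, PySem.List.pyRange_zero_natCast, List.map_map, List.map_map, pvSumMapRange]
  refine Finset.sum_congr rfl (fun k hk => ?_)
  have hkN : k < N := Finset.mem_range.mp hk
  simp only [Function.comp, PySem.List.pyGetD_natCast]
  rw [List.map_map, PySem.List.getD_map_range _ N k 0 hkN]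
  simp only [Function.comp]

theorem pvRotLength (n r : Int) : (pvRot n r).length = n.toNat := by
  simp [pvRot, PySem.List.pyRange_one]

theorem pvRotGetD (n r : Int) (N k : ℕ) (hn : n = (N : Int)) (hk : k < N) :
    (pvRot n r).getD k 0 = PySem.Int.mod (r + (k : Int)) n + 1 := by
  subst hn
  unfold pvRot
  rw [PySem.List.pyRange_zero_natCast, List.map_map]
  exact PySem.List.getD_map_range (fun j : ℕ => PySem.Int.mod (r + (j : Int)) (N : Int) + 1) N k 0 hk

-- A's concatenation of the two ranges IS the rotation list with start index r = i - 1
theorem pvRotEq (n r : Int) (h0 : 0 ≤ r) (h1 : r < n) :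
    PySem.List.pyRange (r + 1) (n + 1) 1 ++ PySem.List.pyRange 1 (r + 1) 1 = pvRot n r := by
  unfold pvRot
  rw [PySem.List.pyRange_one (r + 1) (n + 1), PySem.List.pyRange_one 1 (r + 1),
      PySem.List.pyRange_one 0 n, List.map_map]
  have hsplit : (n - 0).toNat = (n + 1 - (r + 1)).toNat + (r + 1 - 1).toNat := by omega
  rw [hsplit, List.range_add, List.map_append, List.map_map]
  congr 1
  · refine List.map_congr_left (fun k hk => ?_)
    have hk' : k < (n + 1 - (r + 1)).toNat := List.mem_range.mp hk
    simp only [Function.comp]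
    rw [PySem.Int.mod_eq_emod_of_pos (by omega)]
    rw [Int.emod_eq_of_lt (by omega) (by omega)]
    ring
  · refine List.map_congr_left (fun k hk => ?_)
    have hk' : k < (r + 1 - 1).toNat := List.mem_range.mp hk
    simp only [Function.comp]
    rw [PySem.Int.mod_eq_emod_of_pos (by omega)]
    have harg : r + (0 + ((n + 1 - (r + 1)).toNat + k : ℕ)) = (k : Int) + n := by
      push_cast; omega
    rw [harg, Int.add_emod_right, Int.emod_eq_of_lt (by omega) (by omega)]
    ring

-- A's sigma at rotation r equals B's sigma at r (both as closed sums)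
theorem pvSigmaAB (n r : Int) (h0 : 0 ≤ r) (h1 : r < n) :
    (PySem.List.pyRange 0 n 1).foldl (fun s start =>
        (PySem.List.pyRange start n 1).foldl (fun s e =>
          s + (PySem.List.slice (pvRot n r) (some start) (some e)).sum) s) 0
  = (PySem.List.enumerate ((PySem.List.pyRange 0 n 1).map (fun k => (k + 1) * (n - 1 - k)))).foldl
        (fun s kw => s + (PySem.Int.mod (r + kw.1) n + 1) * kw.2) 0 := by
  have hn : n = ((n.toNat : ℕ) : Int) := by omega
  rw [pvSigmaB n r n.toNat hn]
  conv_lhs => rw [hn]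
  rw [pvSigmaA (pvRot ((n.toNat : ℕ) : Int) r) n.toNat (by simp [pvRotLength]; omega)]
  refine Finset.sum_congr rfl (fun k hk => ?_)
  have hkN : k < n.toNat := Finset.mem_range.mp hk
  rw [pvRotGetD ((n.toNat : ℕ) : Int) r n.toNat k rfl hkN, ← hn]
  ring

theorem pvFoldRel (n : Int) (l : List Int) (hmem : ∀ r ∈ l, 0 ≤ r ∧ r < n)
    (s : Int) (o : Option Int) :
    (l.map (fun r => r + 1)).foldl (fun (acc : Int × List Int) i =>
        let buf := PySem.List.pyRange i (n + 1) 1 ++ PySem.List.pyRange 1 i 1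
        let sigma := (PySem.List.pyRange 0 n 1).foldl (fun s start =>
            (PySem.List.pyRange start n 1).foldl (fun s e =>
              s + (PySem.List.slice buf (some start) (some e)).sum) s) 0
        if sigma > acc.1 then (sigma, buf) else acc) (s, pvBufOf n o)
  = (let st := l.foldl (fun (acc : Int × Option Int) r =>
        let sigma := (PySem.List.enumerate ((PySem.List.pyRange 0 n 1).map
            (fun k => (k + 1) * (n - 1 - k)))).foldl
            (fun s kw => s + (PySem.Int.mod (r + kw.1) n + 1) * kw.2) 0
        if sigma > acc.1 then (sigma, some r) else acc) (s, o)
     (st.1, pvBufOf n st.2)) := by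
  induction l generalizing s o with
  | nil => simp
  | cons r t ih =>
      obtain ⟨h0, h1⟩ := hmem r (List.mem_cons_self)
      have hmem' : ∀ x ∈ t, 0 ≤ x ∧ x < n := fun x hx => hmem x (List.mem_cons_of_mem _ hx)
      simp only [List.map_cons, List.foldl_cons]
      rw [pvRotEq n r h0 h1, pvSigmaAB n r h0 h1]
      by_cases hgt : (PySem.List.enumerate ((PySem.List.pyRange 0 n 1).map
            (fun k => (k + 1) * (n - 1 - k)))).foldl
            (fun s kw => s + (PySem.Int.mod (r + kw.1) n + 1) * kw.2) 0 > s
      · simp only [if_pos hgt]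
        exact ih hmem' _ (some r)
      · simp only [if_neg hgt]
        exact ih hmem' s o

theorem consec_sigma_spec : Claim_equal_consec_sigma := by
  intro n _
  unfold Spec_consec_sigma consec_sigma consec_sigma_alt
  have hbufstep :
      (PySem.List.pyRange 1 (n + 1) 1).foldl (fun (acc : Int × List Int) i =>
        let buf := PySem.List.pyRange i (n + 1) 1
        let buf := (PySem.List.pyRange 1 i 1).foldl (fun b j => b ++ [j]) buf
        let sigma := (PySem.List.pyRange 0 n 1).foldl (fun s start =>
            (PySem.List.pyRange start n 1).foldl (fun s e =>
              s + (PySem.List.slice buf (some start) (some e)).sum) s) 0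
        if sigma > acc.1 then (sigma, buf) else acc) ((0 : Int), ([] : List Int))
    = (PySem.List.pyRange 1 (n + 1) 1).foldl (fun (acc : Int × List Int) i =>
        let buf := PySem.List.pyRange i (n + 1) 1 ++ PySem.List.pyRange 1 i 1
        let sigma := (PySem.List.pyRange 0 n 1).foldl (fun s start =>
            (PySem.List.pyRange start n 1).foldl (fun s e =>
              s + (PySem.List.slice buf (some start) (some e)).sum) s) 0
        if sigma > acc.1 then (sigma, buf) else acc) ((0 : Int), ([] : List Int)) := by
    apply PySem.List.foldl_congr_mem'
    intro i _ acc
    dsimp only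
    rw [PySem.List.foldl_append_singleton_eq_self]
  rw [hbufstep]
  have hrange : PySem.List.pyRange 1 (n + 1) 1
      = (PySem.List.pyRange 0 n 1).map (fun r => r + 1) := by
    rw [PySem.List.pyRange_one 1 (n + 1), PySem.List.pyRange_one 0 n, List.map_map]
    have : (n + 1 - 1).toNat = (n - 0).toNat := by omega
    rw [this]
    refine List.map_congr_left (fun k _ => ?_)
    simp only [Function.comp]
    ring
  rw [hrange]
  have hmem : ∀ r ∈ PySem.List.pyRange 0 n 1, 0 ≤ r ∧ r < n := by
    intro r hr
    exact PySem.List.mem_pyRange_one.mp hr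
  have h := pvFoldRel n (PySem.List.pyRange 0 n 1) hmem 0 none
  simp only [pvBufOf] at h
  rw [h]
  rfl
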